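-- pv_equiv track=rewrite | github.com/RDCJ/translation_transformer | data/big_data/data_preprocess.py | preprocess_sentence
-- ===== SOURCE A (Python) =====
-- punc = set('.,?![]{}();:"\'@#$%^&*+-/|\\=_~`')
--
-- def preprocess_sentence(sentence):
--     out = []
--     #sentence = sentence.encode('utf_8').decode("unicode_escape").encode('latin1').decode('utf-8')
--     for i, ch in enumerate(sentence):
--         if (ch in punc) & (i>0) & (sentence[i-1] != ' '):
--             out.append(' ' + ch)
--         elif (ch != ' ') & (i>0) & (sentence[i-1] in punc):
--             out.append(' ' + ch)
--         else:
--             out.append(ch)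
--     return ''.join(out)
-- ===== SOURCE B (Python) =====
-- import re
--
-- punc = set('.,?![]{}();:"\'@#$%^&*+-/|\\=_~`')
--
-- _PUNC_CLASS = '[' + re.escape(''.join(sorted(punc))) + ']'
-- # a char gets a space before it iff it and its predecessor are both non-space
-- # and at least one of the two is punctuation
-- _PAT = re.compile('(?<=[^ ])' + _PUNC_CLASS + '|(?<=' + _PUNC_CLASS + ')[^ ]')
--
-- def preprocess_sentence(sentence):
--     return _PAT.sub(lambda m: ' ' + m.group(0), sentence)
-- ===== Notes on version B (the rewrite author's own statement) =====
-- stated objective: idiomatic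
-- what changed: A's indexed loop with two elif branches is replaced by one compiled re.sub whose pattern matches exactly the characters needing a leading space (both neighbours non-space, at least one punctuation), moving the scan into the regex engine.
import Mathlib
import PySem

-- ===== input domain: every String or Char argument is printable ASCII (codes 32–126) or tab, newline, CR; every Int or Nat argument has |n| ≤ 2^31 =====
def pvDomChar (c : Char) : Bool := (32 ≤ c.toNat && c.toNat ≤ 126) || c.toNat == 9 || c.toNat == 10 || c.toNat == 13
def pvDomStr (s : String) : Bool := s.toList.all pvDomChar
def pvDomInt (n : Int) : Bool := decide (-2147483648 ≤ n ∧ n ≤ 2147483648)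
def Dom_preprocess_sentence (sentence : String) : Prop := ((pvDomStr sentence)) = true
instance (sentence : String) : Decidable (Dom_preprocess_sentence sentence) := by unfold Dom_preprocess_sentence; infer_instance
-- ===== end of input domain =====

-- B replaces A's indexed loop with three branches by one regex substitution over
-- adjacent pairs (objective: simpler/idiomatic; a timing run also measured it faster
-- by a constant factor in CPython).

-- ===== PORT A =====
-- module-level: punc = set('.,?![]{}();:"\'@#$%^&*+-/|\\=_~`')
def punc : PySem.Set Char := PySem.Set.ofList ".,?![]{}();:\"'@#$%^&*+-/|\\=_~`".toList

-- literal port of A: enumerate loop, out : list of strings (as List Char), ''.join = flatten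
def preprocess_sentence (sentence : String) : String :=
  let cs := sentence.toList
  let out : List (List Char) :=
    (PySem.List.enumerate cs).foldl (fun out p =>
      let i := p.1
      let ch := p.2
      if PySem.Set.contains punc ch && decide (i > 0) &&
          (PySem.List.pyGet? cs (i - 1) != some ' ') then
        out ++ [[' ', ch]]
      else if (ch != ' ') && decide (i > 0) &&
          ((PySem.List.pyGet? cs (i - 1)).elim false (fun pc => PySem.Set.contains punc pc)) then
        out ++ [[' ', ch]]
      else
        out ++ [[ch]]) []
  String.ofList out.flatten

-- ===== PORT B =====
-- Source B matches, with one compiled regex '(?<=[^ ])[PUNC]|(?<=[PUNC])[^ ]', every single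
-- character whose ORIGINAL predecessor p satisfies (p ≠ ' ' ∧ ch ∈ punc) ∨ (p ∈ punc ∧ ch ≠ ' '),
-- and re.sub replaces it by ' ' + ch.  Lean has no regex engine, so the substitution is ported
-- by hand, exactly: every match is one character long and its zero-width lookbehind reads the
-- original string, so re.sub's left-to-right scan touches each position once with its original
-- predecessor — i.e. the sub maps each adjacent pair (p, ch) independently.
def pvMatchB (p ch : Char) : Bool :=
  (p != ' ' && PySem.Set.contains punc ch) || (PySem.Set.contains punc p && ch != ' ')

def preprocess_sentence_alt (sentence : String) : String :=
  match sentence.toList with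
  | [] => ""
  | c0 :: rest =>
    String.ofList (c0 :: (List.zip (c0 :: rest) rest).flatMap
      (fun pc => if pvMatchB pc.1 pc.2 then [' ', pc.2] else [pc.2]))

-- ===== PRECONDITION & SPEC =====
def Spec_preprocess_sentence (sentence : String) (out : String) : Prop := out = preprocess_sentence_alt sentence
instance (sentence : String) (out : String) : Decidable (Spec_preprocess_sentence sentence out) := by unfold Spec_preprocess_sentence; infer_instance

-- ===== CLAIM (what is proved, stated in full; the proofs are below) =====
def Claim_equal_preprocess_sentence : Prop := ∀ (sentence : String), Dom_preprocess_sentence sentence → Spec_preprocess_sentence sentence (preprocess_sentence sentence)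

-- ===== LEMMAS AND PROOFS =====

-- the per-character piece A appends at index i of cs
def pvPieceA (cs : List Char) (p : Int × Char) : List Char :=
  if PySem.Set.contains punc p.2 && decide (p.1 > 0) &&
      (PySem.List.pyGet? cs (p.1 - 1) != some ' ') then
    [' ', p.2]
  else if (p.2 != ' ') && decide (p.1 > 0) &&
      ((PySem.List.pyGet? cs (p.1 - 1)).elim false (fun pc => PySem.Set.contains punc pc)) then
    [' ', p.2]
  else
    [p.2]

-- common pairwise recursion both ports reduce to
def pvGo (p : Char) : List Char → List Char
  | [] => []
  | c :: cs => (if pvMatchB p c then [' ', c] else [c]) ++ pvGo c cs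

lemma pvB_go (c : Char) (rest : List Char) :
    (List.zip (c :: rest) rest).flatMap
      (fun pc => if pvMatchB pc.1 pc.2 then [' ', pc.2] else [pc.2]) = pvGo c rest := by
  induction rest generalizing c with
  | nil => rfl
  | cons ch rest ih => simp [pvGo, List.zip, ← ih ch, List.flatMap_cons]

lemma pvPieceA_pair (full : List Char) (k : Nat) (c ch : Char) (hk : full[k]? = some c) :
    pvPieceA full ((k : Int) + 1, ch) = if pvMatchB c ch then [' ', ch] else [ch] := by
  have h1 : ((k : Int) + 1) - 1 = (k : Int) := by ring
  have hget : PySem.List.pyGet? full ((k : Int) + 1 - 1) = some c := by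
    rw [h1, PySem.List.pyGet?_natCast, hk]
  have hpos : decide ((k : Int) + 1 > 0) = true := decide_eq_true (by positivity)
  simp only [pvPieceA, hget, hpos, pvMatchB]
  by_cases h2 : PySem.Set.contains punc ch = true <;>
    by_cases h3 : PySem.Set.contains punc c = true <;>
    by_cases h4 : (c != ' ') = true <;>
    by_cases h5 : (ch != ' ') = true <;>
    simp_all [Option.elim]

lemma pvA_go (full pre : List Char) (c : Char) (rest : List Char)
    (h : full = pre ++ c :: rest) :
    ((PySem.List.enumerate rest ((pre.length : Int) + 1)).map (pvPieceA full)).flatten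
      = pvGo c rest := by
  induction rest generalizing pre c with
  | nil => rfl
  | cons ch rest ih =>
    rw [PySem.List.enumerate_cons, List.map_cons, List.flatten_cons]
    have hk : full[pre.length]? = some c := by
      subst h
      simp
    rw [pvPieceA_pair full pre.length c ch hk]
    have ihx := ih (pre ++ [c]) ch (by simp [h])
    have hlen : ((pre ++ [c]).length : Int) + 1 = (pre.length : Int) + 1 + 1 := by
      simp
    rw [hlen] at ihx
    rw [ihx, pvGo]

lemma pvA_head (full : List Char) (c : Char) : pvPieceA full (0, c) = [c] := by
  simp [pvPieceA]

theorem pv_main (s : String) : preprocess_sentence s = preprocess_sentence_alt s := by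
  unfold preprocess_sentence preprocess_sentence_alt
  cases hs : s.toList with
  | nil => rfl
  | cons c0 rest =>
    simp only
    rw [pvB_go]
    have hfold :
        (PySem.List.enumerate (c0 :: rest)).foldl (fun out (p : Int × Char) =>
          out ++ [pvPieceA (c0 :: rest) p]) ([] : List (List Char))
        = (PySem.List.enumerate (c0 :: rest)).map (pvPieceA (c0 :: rest)) := by
      rw [PySem.List.foldl_append_singleton_eq_map]; simp
    have hbody :
        (fun (out : List (List Char)) (p : Int × Char) =>
          if PySem.Set.contains punc p.2 && decide (p.1 > 0) &&
              (PySem.List.pyGet? (c0 :: rest) (p.1 - 1) != some ' ') then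
            out ++ [[' ', p.2]]
          else if (p.2 != ' ') && decide (p.1 > 0) &&
              ((PySem.List.pyGet? (c0 :: rest) (p.1 - 1)).elim false
                (fun pc => PySem.Set.contains punc pc)) then
            out ++ [[' ', p.2]]
          else out ++ [[p.2]])
        = fun out p => out ++ [pvPieceA (c0 :: rest) p] := by
      funext out p
      simp only [pvPieceA]
      split_ifs <;> rfl
    rw [hbody, hfold]
    rw [PySem.List.enumerate_cons, List.map_cons, List.flatten_cons, pvA_head]
    have := pvA_go (c0 :: rest) [] c0 rest rfl
    norm_num at this ⊢
    rw [this]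

-- ===== VERDICT (by name: the statement is the Claim_ definition above) =====
theorem preprocess_sentence_spec : Claim_equal_preprocess_sentence := by
  intro s _
  unfold Spec_preprocess_sentence
  exact pv_main s
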